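-- pv_equiv track=rewrite | github.com/JarrettOneSource/solomons-dark-modding | tools/probe_bot_close_range_combat.py | filter_loader_log
-- ===== SOURCE A (Python) =====
-- def filter_loader_log(lines: list[str]) -> list[str]:
--     needles = (
--         "attack ",
--         "attack_skip",
--         "queued cast",
--         "skills_wizard_loadout",
--         "pure_primary_start enter",
--         "pure_primary_start exit",
--         "spell_dispatch enter",
--         "spell_dispatch exit",
--         "spell_3ef hook",
--         "cast prepped",
--         "cast prepare failed",
--         "cast post-tick detail",
--         "synthetic cast intent",
--         "cast complete",
--         "cast dispatch failed",
--         "spell_obj diag",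
--         "pure_primary_damage",
--         "No traversable start cell",
--         "run.ended",
--         "destroyed lua bot",
--         "gameplay-slot stock tick rewrote actor position",
--     )
--     filtered = [line for line in lines if any(needle in line for needle in needles)]
--     return filtered[-120:]
-- ===== SOURCE B (Python) =====
-- _NEEDLE_TEXT = (
--     "attack \n"
--     "attack_skip\n"
--     "queued cast\n"
--     "skills_wizard_loadout\n"
--     "pure_primary_start enter\n"
--     "pure_primary_start exit\n"
--     "spell_dispatch enter\n"
--     "spell_dispatch exit\n"
--     "spell_3ef hook\n"
--     "cast prepped\n"
--     "cast prepare failed\n"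
--     "cast post-tick detail\n"
--     "synthetic cast intent\n"
--     "cast complete\n"
--     "cast dispatch failed\n"
--     "spell_obj diag\n"
--     "pure_primary_damage\n"
--     "No traversable start cell\n"
--     "run.ended\n"
--     "destroyed lua bot\n"
--     "gameplay-slot stock tick rewrote actor position"
-- )
--
--
-- def filter_loader_log(lines: list[str]) -> list[str]:
--     needles = _NEEDLE_TEXT.split("\n")
--     out = []
--     need = 120
--     for line in reversed(lines):
--         if need == 0:
--             break
--         if any(needle in line for needle in needles):
--             out.append(line)
--             need -= 1
--     out.reverse()
--     return out
-- ===== Notes on version B (the rewrite author's own statement) =====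
-- stated objective: alternative
-- what changed: Instead of filtering the whole list and slicing the last 120, B walks the list from the tail with a remaining-slots counter, collects matching lines and stops as soon as 120 have been found, then reverses the buffer back to original order; the needle table is kept as one newline-joined constant split at use.
import Mathlib
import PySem

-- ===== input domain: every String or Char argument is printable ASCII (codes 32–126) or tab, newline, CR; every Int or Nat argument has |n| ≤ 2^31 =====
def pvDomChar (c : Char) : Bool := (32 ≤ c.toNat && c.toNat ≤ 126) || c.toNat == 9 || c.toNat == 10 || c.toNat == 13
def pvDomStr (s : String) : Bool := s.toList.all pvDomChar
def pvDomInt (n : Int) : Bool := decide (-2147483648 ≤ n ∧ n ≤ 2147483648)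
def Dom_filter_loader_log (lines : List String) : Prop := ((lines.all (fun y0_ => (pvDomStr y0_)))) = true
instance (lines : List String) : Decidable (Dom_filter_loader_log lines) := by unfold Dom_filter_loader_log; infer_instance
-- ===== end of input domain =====

-- B replaces "filter everything, then slice the last 120" by a reverse walk from the
-- tail with a remaining-slots counter and early stop (objective: alternative decomposition).

-- ===== PORT A =====
-- the needles tuple of A, verbatim
def pvNeedlesA : List String :=
  [ "attack "
  , "attack_skip"
  , "queued cast"
  , "skills_wizard_loadout"
  , "pure_primary_start enter"
  , "pure_primary_start exit"
  , "spell_dispatch enter"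
  , "spell_dispatch exit"
  , "spell_3ef hook"
  , "cast prepped"
  , "cast prepare failed"
  , "cast post-tick detail"
  , "synthetic cast intent"
  , "cast complete"
  , "cast dispatch failed"
  , "spell_obj diag"
  , "pure_primary_damage"
  , "No traversable start cell"
  , "run.ended"
  , "destroyed lua bot"
  , "gameplay-slot stock tick rewrote actor position" ]

def filter_loader_log (lines : List String) : List String :=
  -- filtered = [line for line in lines if any(needle in line for needle in needles)]
  -- return filtered[-120:]
  PySem.List.slice
    (lines.filter (fun line => pvNeedlesA.any (fun needle => PySem.Str.isIn needle line)))
    (some (-120)) none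

-- ===== PORT B =====
-- B's needle table: one newline-joined constant, split("\n") at use
def pvNeedleText : String :=
  "attack \nattack_skip\nqueued cast\nskills_wizard_loadout\npure_primary_start enter\npure_primary_start exit\nspell_dispatch enter\nspell_dispatch exit\nspell_3ef hook\ncast prepped\ncast prepare failed\ncast post-tick detail\nsynthetic cast intent\ncast complete\ncast dispatch failed\nspell_obj diag\npure_primary_damage\nNo traversable start cell\nrun.ended\ndestroyed lua bot\ngameplay-slot stock tick rewrote actor position"

-- any(needle in line for needle in needles), as B's per-line test
def pvHit : List String → String → Bool
  | [], _ => false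
  | n :: ns, line => PySem.Str.isIn n line || pvHit ns line

-- the 'for line in reversed(lines)' loop with counter 'need' and early break
def pvGrab (ns : List String) : List String → List String → Nat → List String
  | _, out, 0 => out
  | [], out, _ => out
  | line :: rest, out, Nat.succ need =>
      if pvHit ns line then pvGrab ns rest (out ++ [line]) need
      else pvGrab ns rest out (Nat.succ need)

set_option maxRecDepth 8192 in
def filter_loader_log_alt (lines : List String) : List String :=
  -- needles = _NEEDLE_TEXT.split("\n"); the separator is non-empty, so split? is some
  (pvGrab ((PySem.Str.split? pvNeedleText "\n").getD []) lines.reverse [] 120).reverse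

-- ===== PRECONDITION & SPEC =====
def Spec_filter_loader_log (lines : List String) (out : List String) : Prop := out = filter_loader_log_alt lines
instance (lines : List String) (out : List String) : Decidable (Spec_filter_loader_log lines out) := by unfold Spec_filter_loader_log; infer_instance

-- ===== CLAIM =====
def Claim_equal_filter_loader_log : Prop := ∀ (lines : List String), Dom_filter_loader_log lines → Spec_filter_loader_log lines (filter_loader_log lines)

-- ===== LEMMAS AND PROOFS =====

-- B's split-up needle constant is exactly A's tuple
set_option maxRecDepth 100000 in
theorem pvNeedles_split : (PySem.Str.split? pvNeedleText "\n").getD [] = pvNeedlesA := by decide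

-- B's explicit any-recursion is List.any
theorem pvHit_eq (ns : List String) (line : String) :
    pvHit ns line = ns.any (fun n => PySem.Str.isIn n line) := by
  induction ns with
  | nil => rfl
  | cons n ns ih => simp [pvHit, ih]

-- the reverse walk collects the first 'need' matches after the prefix 'out'
theorem pvGrab_eq (ns : List String) (xs : List String) : ∀ (out : List String) (need : Nat),
    pvGrab ns xs out need = out ++ (xs.filter (fun l => pvHit ns l)).take need := by
  induction xs with
  | nil => intro out need; cases need <;> simp [pvGrab]
  | cons line rest ih =>
    intro out need
    cases need with
    | zero => simp [pvGrab]
    | succ m =>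
      by_cases hm : pvHit ns line
      · simp [pvGrab, hm, ih]
      · simp [pvGrab, hm, ih]

-- ===== VERDICT =====
theorem filter_loader_log_spec : Claim_equal_filter_loader_log := by
  intro lines _
  unfold Spec_filter_loader_log filter_loader_log filter_loader_log_alt
  rw [pvNeedles_split, pvGrab_eq]
  rw [PySem.List.slice_from_neg_ofNat _ 120 (by omega)]
  simp [pvHit_eq, List.filter_reverse, List.take_reverse]
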